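-- pv_equiv track=rewrite | github.com/gustavopvilela/afd | afd.py | agrupar_estados_equivalentes
-- ===== SOURCE A (Python) =====
-- def agrupar_estados_equivalentes (alcancaveis, nao_equivalentes):
--     # Primeiro, inicializamos cada estado no seu próprio grupo
--     grupos = {}
--     for estado in alcancaveis:
--         grupos[estado] = {estado}
--
--     # Agora, unimos os estados equivalentes
--     for q1 in alcancaveis:
--         for q2 in alcancaveis:
--             if q1 != q2 and (min(q1, q2), max(q1, q2)) not in nao_equivalentes:
--                 # Os estados q1 e q2 são equivalentes
--                 grupo_q1 = None
--                 grupo_q2 = None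
--
--                 # Encontrando os grupos dos estados
--                 for representante, grupo in grupos.items():
--                     if q1 in grupo:
--                         grupo_q1 = representante
--                     if q2 in grupo:
--                         grupo_q2 = representante
--
--                 # Se estão em grupos diferentes, são unidos
--                 if grupo_q1 != grupo_q2:
--                     grupos[grupo_q1].update(grupos[grupo_q2])
--                     del grupos[grupo_q2]
--
--                     for estado in grupos[grupo_q1]:
--                         if estado != grupo_q1:
--                             if estado in grupos:
--                                 del grupos[estado]
--
--     # Retornando a lista de conjuntos de estados equivalentes
--     return list(grupos.values())
-- ===== SOURCE B (Python) =====
-- def agrupar_estados_equivalentes(alcancaveis, nao_equivalentes):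
--     # A maintained state->representative map replaces A's per-pair scan over all
--     # groups, and each unordered pair of positions is examined once (j > i).
--     nao_eq = set(nao_equivalentes)
--     rep = {}
--     membros = {}
--     for estado in alcancaveis:
--         rep[estado] = estado
--         membros[estado] = [estado]
--     for i, q1 in enumerate(alcancaveis):
--         for q2 in alcancaveis[i + 1:]:
--             if q1 != q2 and (min(q1, q2), max(q1, q2)) not in nao_eq:
--                 r1 = rep[q1]
--                 r2 = rep[q2]
--                 if r1 != r2:
--                     for s in membros[r2]:
--                         rep[s] = r1
--                     membros[r1] = membros[r1] + membros[r2]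
--                     del membros[r2]
--     return list(membros.values())
-- ===== Notes on version B (the rewrite author's own statement) =====
-- stated objective: faster
-- what changed: B replaces A's per-pair linear scan over all groups (and its per-merge cleanup pass) by a maintained state-to-representative dictionary updated on each merge, tests non-equivalence against a set built once instead of a list, and visits each unordered pair of positions once (j > i) instead of all ordered pairs.
import Mathlib
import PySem

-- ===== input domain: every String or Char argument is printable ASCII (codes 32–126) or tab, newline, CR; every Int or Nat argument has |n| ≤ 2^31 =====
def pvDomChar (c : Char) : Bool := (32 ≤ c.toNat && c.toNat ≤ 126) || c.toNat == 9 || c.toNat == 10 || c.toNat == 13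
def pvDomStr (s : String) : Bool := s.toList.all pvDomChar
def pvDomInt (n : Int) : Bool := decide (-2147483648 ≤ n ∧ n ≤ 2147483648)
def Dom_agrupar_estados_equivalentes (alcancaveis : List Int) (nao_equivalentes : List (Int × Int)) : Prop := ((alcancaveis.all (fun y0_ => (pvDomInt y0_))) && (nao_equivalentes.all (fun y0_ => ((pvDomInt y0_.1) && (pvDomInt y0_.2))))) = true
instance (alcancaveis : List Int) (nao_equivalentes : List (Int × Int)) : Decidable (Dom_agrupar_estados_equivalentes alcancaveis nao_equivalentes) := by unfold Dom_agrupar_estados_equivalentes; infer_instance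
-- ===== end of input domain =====

-- B replaces A's per-pair scan over all groups by a maintained state→representative
-- map and visits each unordered pair of positions once; measured much faster.

-- ===== PORT A =====
-- the two inner scans "for representante, grupo in grupos.items()" (last match wins, as in A)
def pvFindGrupos (items : List (Int × List Int)) (q1 q2 : Int) : Option Int × Option Int :=
  items.foldl (fun acc p =>
    (if p.2.contains q1 then some p.1 else acc.1,
     if p.2.contains q2 then some p.1 else acc.2)) (none, none)

-- body of A's double loop over (q1, q2)
def pvStepA (ne : List (Int × Int)) (g : PySem.Dict Int (PySem.Set Int)) (q1 q2 : Int) :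
    PySem.Dict Int (PySem.Set Int) :=
  if q1 ≠ q2 ∧ (min q1 q2, max q1 q2) ∉ ne then
    let fr := pvFindGrupos g.items q1 q2
    if fr.1 ≠ fr.2 then
      match fr.1, fr.2 with
      | some r1, some r2 =>
        -- grupos[grupo_q1].update(grupos[grupo_q2]); del grupos[grupo_q2]
        let merged := PySem.Set.update (g.getD r1 []) (g.getD r2 [])
        let g' := (g.insert r1 merged).erase r2
        -- the cleanup loop "for estado in grupos[grupo_q1]: …"
        merged.foldl (fun d estado =>
          if estado ≠ r1 ∧ d.contains estado = true then d.erase estado else d) g'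
      | _, _ => g  -- unreachable: q1, q2 always lie in some group (Python would raise KeyError)
    else g
  else g

def agrupar_estados_equivalentes (alcancaveis : List Int) (nao_equivalentes : List (Int × Int)) : List (List Int) :=
  let g0 : PySem.Dict Int (PySem.Set Int) :=
    alcancaveis.foldl (fun d e => d.insert e (PySem.Set.ofList [e])) PySem.Dict.empty
  let g := alcancaveis.foldl
    (fun g q1 => alcancaveis.foldl (fun g q2 => pvStepA nao_equivalentes g q1 q2) g) g0
  g.values

-- ===== PORT B =====
-- body of B's pair loop
def pvStepB (neS : PySem.Set (Int × Int)) (st : PySem.Dict Int Int × PySem.Dict Int (List Int))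
    (q1 q2 : Int) : PySem.Dict Int Int × PySem.Dict Int (List Int) :=
  if q1 ≠ q2 ∧ ¬ (neS.contains (min q1 q2, max q1 q2) = true) then
    match st.1.get? q1, st.1.get? q2 with
    | some r1, some r2 =>
      if r1 ≠ r2 then
        let m2 := st.2.getD r2 []
        (m2.foldl (fun r s => r.insert s r1) st.1,
         (st.2.insert r1 (st.2.getD r1 [] ++ m2)).erase r2)
      else st
    | _, _ => st  -- unreachable: rep has a key for every state (Python would raise KeyError)
  else st

-- "for i, q1 in enumerate(alcancaveis): for q2 in alcancaveis[i+1:]: …"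
def pvLoopB (neS : PySem.Set (Int × Int)) (st : PySem.Dict Int Int × PySem.Dict Int (List Int)) :
    List Int → PySem.Dict Int Int × PySem.Dict Int (List Int)
  | [] => st
  | q1 :: rest => pvLoopB neS (rest.foldl (fun st q2 => pvStepB neS st q1 q2) st) rest

def agrupar_estados_equivalentes_alt (alcancaveis : List Int) (nao_equivalentes : List (Int × Int)) : List (List Int) :=
  let neS : PySem.Set (Int × Int) := PySem.Set.ofList nao_equivalentes
  let st0 := alcancaveis.foldl
    (fun st e => (st.1.insert e e, st.2.insert e [e]))
    ((PySem.Dict.empty : PySem.Dict Int Int), (PySem.Dict.empty : PySem.Dict Int (List Int)))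
  (pvLoopB neS st0 alcancaveis).2.values

-- ===== PRECONDITION & SPEC =====
def Spec_agrupar_estados_equivalentes (alcancaveis : List Int) (nao_equivalentes : List (Int × Int)) (out : List (List Int)) : Prop := out = agrupar_estados_equivalentes_alt alcancaveis nao_equivalentes
instance (alcancaveis : List Int) (nao_equivalentes : List (Int × Int)) (out : List (List Int)) : Decidable (Spec_agrupar_estados_equivalentes alcancaveis nao_equivalentes out) := by unfold Spec_agrupar_estados_equivalentes; infer_instance

-- ===== CLAIM (what is proved, stated in full; the proofs are below) =====
def Claim_equal_agrupar_estados_equivalentes : Prop := ∀ (alcancaveis : List Int) (nao_equivalentes : List (Int × Int)), Dom_agrupar_estados_equivalentes alcancaveis nao_equivalentes → Spec_agrupar_estados_equivalentes alcancaveis nao_equivalentes (agrupar_estados_equivalentes alcancaveis nao_equivalentes)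

-- ===== LEMMAS AND PROOFS =====

-- ---- A's state seen abstractly ----
def pvEdge (ne : List (Int × Int)) (a b : Int) : Prop := a ≠ b ∧ (min a b, max a b) ∉ ne
def pvInG (g : PySem.Dict Int (List Int)) (s : Int) : Prop := ∃ k v, g.get? k = some v ∧ s ∈ v
def pvSameG (g : PySem.Dict Int (List Int)) (a b : Int) : Prop :=
  ∃ k v, g.get? k = some v ∧ a ∈ v ∧ b ∈ v
def pvDone (ne : List (Int × Int)) (g : PySem.Dict Int (List Int)) (a b : Int) : Prop :=
  ¬ pvEdge ne a b ∨ pvSameG g a b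
def pvGInv (g : PySem.Dict Int (List Int)) : Prop :=
  g.keys.Nodup ∧ (∀ k v, g.get? k = some v → k ∈ v ∧ v.Nodup) ∧
  g.items.Pairwise (fun p p' => p.2.Disjoint p'.2)
def pvGroupKey? (g : PySem.Dict Int (List Int)) (s : Int) : Option Int :=
  (g.items.find? (fun p => p.2.contains s)).map (·.1)
def pvRepInv (r : PySem.Dict Int Int) (g : PySem.Dict Int (List Int)) : Prop :=
  ∀ s, r.get? s = pvGroupKey? g s
-- the triangular merge loop, on A's steps (common shape of both programs)
def pvTriA (ne : List (Int × Int)) (g : PySem.Dict Int (List Int)) :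
    List Int → PySem.Dict Int (List Int)
  | [] => g
  | q1 :: rest => pvTriA ne (rest.foldl (fun g q2 => pvStepA ne g q1 q2) g) rest

-- ---- generic helpers ----
theorem pv_foldl_id {α β : Type} (f : β → α → β) (d : β) (l : List α)
    (h : ∀ x ∈ l, f d x = d) : l.foldl f d = d := by
  induction l with
  | nil => rfl
  | cons a t ih =>
    have ha := h a (by simp)
    simp only [List.foldl_cons, ha]
    exact ih (fun x hx => h x (by simp [hx]))

theorem pv_foldl_pair {α β γ : Type} (l : List α) (f : β → α → β) (h : γ → α → γ)
    (b : β) (c : γ) :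
    l.foldl (fun st e => (f st.1 e, h st.2 e)) (b, c) = (l.foldl f b, l.foldl h c) := by
  induction l generalizing b c with
  | nil => rfl
  | cons a t ih => simp only [List.foldl_cons, ih]

theorem pv_get?_foldl_insert {ν : Type} (f : Int → ν) (l : List Int) (d : PySem.Dict Int ν)
    (s : Int) :
    (l.foldl (fun d e => d.insert e (f e)) d).get? s =
      if s ∈ l then some (f s) else d.get? s := by
  induction l generalizing d with
  | nil => simp
  | cons a t ih =>
    simp only [List.foldl_cons, ih, PySem.Dict.get?_insert, List.mem_cons]
    by_cases hst : s ∈ t <;> by_cases hsa : s = a <;> simp [hst, hsa]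

theorem pv_update_append (s t : List Int) (h : ∀ x ∈ t, x ∉ s) (ht : t.Nodup) :
    PySem.Set.update s t = s ++ t := by
  induction t generalizing s with
  | nil => simp [PySem.Set.update]
  | cons a t ih =>
    have hna : a ∉ s := h a (by simp)
    have hadd : PySem.Set.add s a = s ++ [a] := by
      simp [PySem.Set.add, List.contains_iff_mem, hna]
    simp only [PySem.Set.update, List.foldl_cons, hadd]
    have ht' := ht
    simp only [List.nodup_cons] at ht'
    have := ih (s ++ [a]) (fun x hx => by
      simp only [List.mem_append, List.mem_singleton]
      rintro (hs | rfl)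
      · exact h x (by simp [hx]) hs
      · exact ht'.1 hx) ht'.2
    simpa [PySem.Set.update, List.append_assoc] using this

theorem pv_find?_filter_ne {v : Type} (t : List (Int × v)) (k k' : Int) (h : k' ≠ k) :
    (t.filter (fun p => !(p.1 == k))).find? (fun p => p.1 == k') =
      t.find? (fun p => p.1 == k') := by
  induction t with
  | nil => simp
  | cons p t ih =>
    by_cases hpk : p.1 = k
    · rw [List.filter_cons, if_neg (by simp [hpk]), ih,
        List.find?_cons_of_neg (by simp [hpk]; exact fun hh => h hh.symm)]
    · rw [List.filter_cons, if_pos (by simp [hpk])]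
      by_cases hp : p.1 = k'
      · rw [List.find?_cons_of_pos (by simp [hp]), List.find?_cons_of_pos (by simp [hp])]
      · rw [List.find?_cons_of_neg (by simp [hp]), List.find?_cons_of_neg (by simp [hp]), ih]

theorem pv_get?_erase {v : Type} (d : PySem.Dict Int v) (k k' : Int) :
    (d.erase k).get? k' = if k' = k then none else d.get? k' := by
  by_cases hk : k' = k
  · subst hk
    simp only [PySem.Dict.erase, PySem.Dict.get?, if_pos rfl]
    have : (d.items.filter (fun p => !(p.1 == k'))).find? (fun p => p.1 == k') = none := by
      rw [List.find?_eq_none]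
      intro x hx
      have := List.of_mem_filter hx
      simp at this ⊢
      exact this
    simp [this]
  · simp only [PySem.Dict.erase, PySem.Dict.get?, if_neg hk]
    rw [pv_find?_filter_ne _ _ _ hk]

theorem pv_items_erase {ν : Type} (d : PySem.Dict Int ν) (k : Int) :
    (d.erase k).items = d.items.filter (fun p => !(p.1 == k)) := rfl

theorem pv_nodup_keys_erase {ν : Type} (d : PySem.Dict Int ν) (k : Int)
    (h : d.keys.Nodup) : (d.erase k).keys.Nodup := by
  simp only [PySem.Dict.keys, pv_items_erase] at *
  exact ((List.filter_sublist.map _).nodup h)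
-- ---- facts about groups under the invariant ----
theorem pv_disj_get? (g : PySem.Dict Int (List Int)) (h : pvGInv g) {k k' : Int}
    {v v' : List Int} (hk : g.get? k = some v) (hk' : g.get? k' = some v')
    (hne : k ≠ k') : v.Disjoint v' := by
  have h1 := PySem.Dict.mem_items_of_get?_eq_some g hk
  have h2 := PySem.Dict.mem_items_of_get?_eq_some g hk'
  have hsym : Symmetric (fun p p' : Int × List Int => p.2.Disjoint p'.2) :=
    fun p p' hd => hd.symm
  exact h.2.2.forall hsym h1 h2 (fun hh => hne (congrArg Prod.fst hh))

theorem pv_mem_unique (g : PySem.Dict Int (List Int)) (h : pvGInv g) {p p' : Int × List Int}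
    {q : Int} (hp : p ∈ g.items) (hp' : p' ∈ g.items) (hq : q ∈ p.2) (hq' : q ∈ p'.2) :
    p = p' := by
  by_contra hne
  have hsym : Symmetric (fun p p' : Int × List Int => p.2.Disjoint p'.2) :=
    fun p p' hd => hd.symm
  exact (h.2.2.forall hsym hp hp' hne) hq hq'

theorem pv_groupKey?_some (g : PySem.Dict Int (List Int)) (h : pvGInv g) {k s : Int}
    {v : List Int} (hk : g.get? k = some v) (hs : s ∈ v) : pvGroupKey? g s = some k := by
  have hmemkv : (k, v) ∈ g.items := PySem.Dict.mem_items_of_get?_eq_some g hk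
  have hex : (g.items.find? (fun p => p.2.contains s)).isSome := by
    rw [List.find?_isSome]
    exact ⟨(k, v), hmemkv, by simp [List.contains_iff_mem, hs]⟩
  obtain ⟨p, hfind⟩ := Option.isSome_iff_exists.mp hex
  have hmem := List.mem_of_find?_eq_some hfind
  have hpred : s ∈ p.2 := by
    have := List.find?_some hfind
    simpa [List.contains_iff_mem] using this
  have := pv_mem_unique g h hmem hmemkv hpred hs
  subst this
  unfold pvGroupKey?
  rw [hfind]
  rfl

theorem pv_groupKey?_none (g : PySem.Dict Int (List Int)) (h : pvGInv g)
    {s : Int} (hs : ¬ pvInG g s) : pvGroupKey? g s = none := by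
  simp only [pvGroupKey?, Option.map_eq_none_iff, List.find?_eq_none]
  intro p hp hc
  exact hs ⟨p.1, p.2, PySem.Dict.get?_of_mem_items g (by exact hp) h.1,
    by simpa [List.contains_iff_mem] using hc⟩

theorem pv_groupKey?_some_inv (g : PySem.Dict Int (List Int)) (h : pvGInv g) {s k : Int}
    (hk : pvGroupKey? g s = some k) : ∃ v, g.get? k = some v ∧ s ∈ v := by
  simp only [pvGroupKey?, Option.map_eq_some_iff] at hk
  obtain ⟨p, hfind, hp1⟩ := hk
  have hmem := List.mem_of_find?_eq_some hfind
  have hpred : s ∈ p.2 := by simpa [List.contains_iff_mem] using List.find?_some hfind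
  exact ⟨p.2, hp1 ▸ PySem.Dict.get?_of_mem_items g (by exact hmem) h.1, hpred⟩

theorem pv_foldl_stay (t : List (Int × List Int)) (q c : Int)
    (h : ∀ p ∈ t, p.2.contains q = true → p.1 = c) :
    t.foldl (fun a p => if p.2.contains q then some p.1 else a) (some c) = some c := by
  induction t with
  | nil => rfl
  | cons p t ih =>
    simp only [List.foldl_cons]
    by_cases hc : p.2.contains q = true
    · rw [if_pos hc, h p (by simp) hc]
      exact ih (fun p' hp' => h p' (by simp [hp']))
    · rw [if_neg hc]
      exact ih (fun p' hp' => h p' (by simp [hp']))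

theorem pv_foldl_lastfind (l : List (Int × List Int)) (q : Int)
    (huniq : ∀ p ∈ l, ∀ p' ∈ l, q ∈ p.2 → q ∈ p'.2 → p = p') :
    l.foldl (fun a p => if p.2.contains q then some p.1 else a) none =
      (l.find? (fun p => p.2.contains q)).map (·.1) := by
  induction l with
  | nil => rfl
  | cons p t ih =>
    simp only [List.foldl_cons]
    by_cases hc : p.2.contains q = true
    · rw [if_pos hc, List.find?_cons_of_pos (p := fun r : Int × List Int => r.2.contains q) hc]
      have hq : q ∈ p.2 := by simpa [List.contains_iff_mem] using hc
      have : t.foldl (fun a p => if p.2.contains q then some p.1 else a) (some p.1) =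
          some p.1 := by
        apply pv_foldl_stay
        intro p' hp' hc'
        have hq' : q ∈ p'.2 := by simpa [List.contains_iff_mem] using hc'
        exact congrArg Prod.fst (huniq p' (by simp [hp']) p (by simp) hq' hq)
      rw [this]
      rfl
    · rw [if_neg hc, List.find?_cons_of_neg (p := fun r : Int × List Int => r.2.contains q) (by simpa using hc)]
      exact ih (fun p' hp' p'' hp'' => huniq p' (by simp [hp']) p'' (by simp [hp'']))

theorem pv_fold_pairacc (l : List (Int × List Int)) (q1 q2 : Int)
    (a b : Option Int) :
    l.foldl (fun acc p =>
      (if p.2.contains q1 then some p.1 else acc.1,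
       if p.2.contains q2 then some p.1 else acc.2)) (a, b) =
    (l.foldl (fun a p => if p.2.contains q1 then some p.1 else a) a,
     l.foldl (fun a p => if p.2.contains q2 then some p.1 else a) b) := by
  induction l generalizing a b with
  | nil => rfl
  | cons p t ih => simp only [List.foldl_cons, ih]

theorem pv_findGrupos_eq (g : PySem.Dict Int (List Int)) (h : pvGInv g) (q1 q2 : Int) :
    pvFindGrupos g.items q1 q2 = (pvGroupKey? g q1, pvGroupKey? g q2) := by
  have huniq : ∀ q : Int, ∀ p ∈ g.items, ∀ p' ∈ g.items, q ∈ p.2 → q ∈ p'.2 → p = p' :=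
    fun q p hp p' hp' hq hq' => pv_mem_unique g h hp hp' hq hq'
  simp only [pvFindGrupos, pv_fold_pairacc, pvGroupKey?]
  rw [pv_foldl_lastfind _ _ (huniq q1), pv_foldl_lastfind _ _ (huniq q2)]
-- ---- the merged state produced by one uniting step ----
theorem pv_merge_get? (g : PySem.Dict Int (List Int)) (r1 r2 : Int) (v : List Int)
    (hr : r1 ≠ r2) (k : Int) :
    ((g.insert r1 v).erase r2).get? k =
      if k = r2 then none else if k = r1 then some v else g.get? k := by
  rw [pv_get?_erase, PySem.Dict.get?_insert]

theorem pv_merge_GInv (g : PySem.Dict Int (List Int)) (hG : pvGInv g) {r1 r2 : Int}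
    {v1 v2 : List Int} (h1 : g.get? r1 = some v1) (h2 : g.get? r2 = some v2)
    (hr : r1 ≠ r2) : pvGInv ((g.insert r1 (v1 ++ v2)).erase r2) := by
  have hc1 : g.contains r1 = true := by
    rw [PySem.Dict.contains_eq_isSome_get?, h1]; rfl
  have hdisj12 : v1.Disjoint v2 := pv_disj_get? g hG h1 h2 hr
  refine ⟨?_, ?_, ?_⟩
  · exact pv_nodup_keys_erase _ _ (by rw [PySem.Dict.keys_insert_of_contains g _ hc1]; exact hG.1)
  · intro k v hk
    rw [pv_merge_get? g r1 r2 _ hr] at hk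
    by_cases hk2 : k = r2
    · simp [hk2] at hk
    · rw [if_neg hk2] at hk
      by_cases hk1 : k = r1
      · rw [if_pos hk1] at hk
        obtain rfl : v1 ++ v2 = v := by simpa using hk
        subst hk1
        exact ⟨by simp [(hG.2.1 _ _ h1).1],
          List.Nodup.append (hG.2.1 _ _ h1).2 (hG.2.1 _ _ h2).2 hdisj12⟩
      · rw [if_neg hk1] at hk
        exact hG.2.1 _ _ hk
  · -- pairwise disjointness of the remaining groups
    have hitems : ((g.insert r1 (v1 ++ v2)).erase r2).items =
        (g.items.filter (fun p => !(p.1 == r2))).map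
          (fun p => if (p.1 == r1) = true then (r1, v1 ++ v2) else p) := by
      rw [pv_items_erase, PySem.Dict.items_insert_of_contains g _ hc1, List.filter_map]
      congr 1
      apply List.filter_congr
      intro p _
      by_cases hp : p.1 = r1 <;> simp [hp, Function.comp, hr]
    rw [hitems, List.pairwise_map]
    have hkeysne : g.items.Pairwise (fun p p' => p.1 ≠ p'.1) := by
      have := hG.1
      rw [PySem.Dict.keys, List.Nodup, List.pairwise_map] at this
      exact this
    have hPW : (g.items.filter (fun p => !(p.1 == r2))).Pairwise
        (fun p p' => p.1 ≠ p'.1 ∧ p.2.Disjoint p'.2) :=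
      (hkeysne.and hG.2.2).sublist List.filter_sublist
    refine hPW.imp_of_mem ?_
    intro p p' hp hp' hrel
    have hpr2 : p.1 ≠ r2 := by simpa using (List.mem_filter.mp hp).2
    have hp'r2 : p'.1 ≠ r2 := by simpa using (List.mem_filter.mp hp').2
    have hpmem := (List.mem_filter.mp hp).1
    have hp'mem := (List.mem_filter.mp hp').1
    have hgp : g.get? p.1 = some p.2 :=
      PySem.Dict.get?_of_mem_items g (by simpa using hpmem) hG.1
    have hgp' : g.get? p'.1 = some p'.2 :=
      PySem.Dict.get?_of_mem_items g (by simpa using hp'mem) hG.1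
    by_cases hp1 : p.1 = r1
    · rw [if_pos (by simp [hp1])]
      have hpv : p.2 = v1 := by
        rw [hp1, h1] at hgp
        exact (Option.some.inj hgp).symm
      have hp'1 : p'.1 ≠ r1 := fun h => hrel.1 (by rw [hp1, h])
      rw [if_neg (by simp [hp'1])]
      intro x hx hx'
      rcases List.mem_append.mp hx with hx1 | hx2
      · exact hrel.2 (hpv ▸ hx1) hx'
      · exact pv_disj_get? g hG h2 hgp' (Ne.symm hp'r2) hx2 hx'
    · rw [if_neg (by simp [hp1])]
      by_cases hp'1 : p'.1 = r1
      · rw [if_pos (by simp [hp'1])]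
        have hp'v : p'.2 = v1 := by
          rw [hp'1, h1] at hgp'
          exact (Option.some.inj hgp').symm
        intro x hx hx'
        rcases List.mem_append.mp hx' with hy1 | hy2
        · exact hrel.2 hx (hp'v ▸ hy1)
        · exact pv_disj_get? g hG h2 hgp (Ne.symm hpr2) hy2 hx
      · rw [if_neg (by simp [hp'1])]
        exact hrel.2

theorem pv_merge_inG (g : PySem.Dict Int (List Int)) (hG : pvGInv g) {r1 r2 : Int}
    {v1 v2 : List Int} (h1 : g.get? r1 = some v1) (h2 : g.get? r2 = some v2)
    (hr : r1 ≠ r2) (s : Int) :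
    pvInG ((g.insert r1 (v1 ++ v2)).erase r2) s ↔ pvInG g s := by
  constructor
  · rintro ⟨k, v, hk, hs⟩
    rw [pv_merge_get? g r1 r2 _ hr] at hk
    by_cases hk2 : k = r2
    · simp [hk2] at hk
    · rw [if_neg hk2] at hk
      by_cases hk1 : k = r1
      · rw [if_pos hk1] at hk
        obtain rfl : v1 ++ v2 = v := by simpa using hk
        rcases List.mem_append.mp hs with hs1 | hs2
        · exact ⟨r1, v1, h1, hs1⟩
        · exact ⟨r2, v2, h2, hs2⟩
      · rw [if_neg hk1] at hk
        exact ⟨k, v, hk, hs⟩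
  · rintro ⟨k, v, hk, hs⟩
    by_cases hk1 : k = r1
    · subst hk1
      obtain rfl : v1 = v := by rw [h1] at hk; exact Option.some.inj hk
      exact ⟨k, v1 ++ v2, by rw [pv_merge_get? g k r2 _ hr, if_neg hr, if_pos rfl],
        by simp [hs]⟩
    · by_cases hk2 : k = r2
      · subst hk2
        obtain rfl : v2 = v := by rw [h2] at hk; exact Option.some.inj hk
        exact ⟨r1, v1 ++ v2, by rw [pv_merge_get? g r1 k _ hr, if_neg hr, if_pos rfl],
          by simp [hs]⟩
      · exact ⟨k, v, by rw [pv_merge_get? g r1 r2 _ hr, if_neg hk2, if_neg hk1]; exact hk, hs⟩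

theorem pv_merge_sameG (g : PySem.Dict Int (List Int)) (hG : pvGInv g) {r1 r2 : Int}
    {v1 v2 : List Int} (h1 : g.get? r1 = some v1) (h2 : g.get? r2 = some v2)
    (hr : r1 ≠ r2) {a b : Int} (h : pvSameG g a b) :
    pvSameG ((g.insert r1 (v1 ++ v2)).erase r2) a b := by
  obtain ⟨k, v, hk, ha, hb⟩ := h
  have hmerged : ((g.insert r1 (v1 ++ v2)).erase r2).get? r1 = some (v1 ++ v2) := by
    rw [pv_merge_get? g r1 r2 _ hr, if_neg hr, if_pos rfl]
  by_cases hk1 : k = r1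
  · subst hk1
    obtain rfl : v1 = v := by rw [h1] at hk; exact Option.some.inj hk
    exact ⟨k, v1 ++ v2, hmerged, by simp [ha], by simp [hb]⟩
  · by_cases hk2 : k = r2
    · subst hk2
      obtain rfl : v2 = v := by rw [h2] at hk; exact Option.some.inj hk
      exact ⟨r1, v1 ++ v2, hmerged, by simp [ha], by simp [hb]⟩
    · exact ⟨k, v, by rw [pv_merge_get? g r1 r2 _ hr, if_neg hk2, if_neg hk1]; exact hk,
        ha, hb⟩

theorem pv_merge_groupKey? (g : PySem.Dict Int (List Int)) (hG : pvGInv g) {r1 r2 : Int}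
    {v1 v2 : List Int} (h1 : g.get? r1 = some v1) (h2 : g.get? r2 = some v2)
    (hr : r1 ≠ r2) (s : Int) :
    pvGroupKey? ((g.insert r1 (v1 ++ v2)).erase r2) s =
      if s ∈ v1 ∨ s ∈ v2 then some r1 else pvGroupKey? g s := by
  have hG' := pv_merge_GInv g hG h1 h2 hr
  have hmerged : ((g.insert r1 (v1 ++ v2)).erase r2).get? r1 = some (v1 ++ v2) := by
    rw [pv_merge_get? g r1 r2 _ hr, if_neg hr, if_pos rfl]
  by_cases hs : s ∈ v1 ∨ s ∈ v2
  · rw [if_pos hs]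
    exact pv_groupKey?_some _ hG' hmerged (List.mem_append.mpr hs)
  · rw [if_neg hs]
    push_neg at hs
    cases hgk : pvGroupKey? g s with
    | none =>
      apply pv_groupKey?_none _ hG'
      rw [pv_merge_inG g hG h1 h2 hr]
      rintro ⟨k, v, hk, hsv⟩
      rw [pv_groupKey?_some g hG hk hsv] at hgk
      exact (Option.some_ne_none k) hgk
    | some k =>
      obtain ⟨v, hk, hsv⟩ := pv_groupKey?_some_inv g hG hgk
      have hk1 : k ≠ r1 := by
        rintro rfl
        rw [h1] at hk
        exact hs.1 ((Option.some.inj hk) ▸ hsv)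
      have hk2 : k ≠ r2 := by
        rintro rfl
        rw [h2] at hk
        exact hs.2 ((Option.some.inj hk) ▸ hsv)
      exact pv_groupKey?_some _ hG'
        (by rw [pv_merge_get? g r1 r2 _ hr, if_neg hk2, if_neg hk1]; exact hk) hsv

theorem pv_merge_cleanup (g : PySem.Dict Int (List Int)) (hG : pvGInv g) {r1 r2 : Int}
    {v1 v2 : List Int} (h1 : g.get? r1 = some v1) (h2 : g.get? r2 = some v2)
    (hr : r1 ≠ r2) :
    (v1 ++ v2).foldl (fun d estado =>
        if estado ≠ r1 ∧ d.contains estado = true then d.erase estado else d)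
      ((g.insert r1 (v1 ++ v2)).erase r2) = (g.insert r1 (v1 ++ v2)).erase r2 := by
  apply pv_foldl_id
  intro x hx
  by_cases hx1 : x = r1
  · rw [if_neg (by simp [hx1])]
  · rw [if_neg ?_]
    rintro ⟨-, hcont⟩
    rw [PySem.Dict.contains_eq_isSome_get?, pv_merge_get? g r1 r2 _ hr] at hcont
    by_cases hx2 : x = r2
    · simp [hx2] at hcont
    · rw [if_neg hx2, if_neg hx1] at hcont
      cases hv : g.get? x with
      | none => rw [hv] at hcont; exact Bool.noConfusion hcont
      | some v =>
        have hxv : x ∈ v := (hG.2.1 _ _ hv).1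
        rcases List.mem_append.mp hx with hm1 | hm2
        · exact pv_disj_get? g hG hv h1 hx1 hxv hm1
        · exact pv_disj_get? g hG hv h2 hx2 hxv hm2

-- ---- the four behaviours of A's step ----
theorem pv_stepA_of_nedge (ne : List (Int × Int)) (g : PySem.Dict Int (List Int))
    {q1 q2 : Int} (h : ¬ pvEdge ne q1 q2) : pvStepA ne g q1 q2 = g := by
  unfold pvStepA
  rw [if_neg (by exact h)]

theorem pv_stepA_of_same (ne : List (Int × Int)) (g : PySem.Dict Int (List Int))
    {q1 q2 : Int} (hG : pvGInv g) (hk : pvGroupKey? g q1 = pvGroupKey? g q2) :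
    pvStepA ne g q1 q2 = g := by
  unfold pvStepA
  by_cases hedge : q1 ≠ q2 ∧ (min q1 q2, max q1 q2) ∉ ne
  · rw [if_pos hedge]
    simp only [pv_findGrupos_eq g hG q1 q2, hk, ne_eq, not_true_eq_false, ite_eq_right_iff]
    intro h
    exact h.elim
  · rw [if_neg hedge]

theorem pv_stepA_of_none (ne : List (Int × Int)) (g : PySem.Dict Int (List Int))
    {q1 q2 : Int} (hG : pvGInv g)
    (h : pvGroupKey? g q1 = none ∨ pvGroupKey? g q2 = none) :
    pvStepA ne g q1 q2 = g := by
  unfold pvStepA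
  by_cases hedge : q1 ≠ q2 ∧ (min q1 q2, max q1 q2) ∉ ne
  · rw [if_pos hedge]
    simp only [pv_findGrupos_eq g hG q1 q2]
    cases hk1 : pvGroupKey? g q1 with
    | none =>
      cases hk2 : pvGroupKey? g q2 <;> simp
    | some r1 =>
      cases hk2 : pvGroupKey? g q2 with
      | none => simp
      | some r2 => rw [hk1, hk2] at h; rcases h with h | h <;> exact (Option.some_ne_none _ h).elim
  · rw [if_neg hedge]

theorem pv_stepA_of_merge (ne : List (Int × Int)) (g : PySem.Dict Int (List Int))
    {q1 q2 : Int} (hG : pvGInv g) (hedge : pvEdge ne q1 q2) {r1 r2 : Int}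
    {v1 v2 : List Int} (hk1 : pvGroupKey? g q1 = some r1)
    (hk2 : pvGroupKey? g q2 = some r2) (hr : r1 ≠ r2)
    (h1 : g.get? r1 = some v1) (h2 : g.get? r2 = some v2) :
    pvStepA ne g q1 q2 = (g.insert r1 (v1 ++ v2)).erase r2 := by
  have hg1 : g.getD r1 [] = v1 := PySem.Dict.getD_of_get?_eq_some g [] h1
  have hg2 : g.getD r2 [] = v2 := PySem.Dict.getD_of_get?_eq_some g [] h2
  have hupd : PySem.Set.update v1 v2 = v1 ++ v2 :=
    pv_update_append v1 v2 (fun x hx hx' => pv_disj_get? g hG h2 h1 (Ne.symm hr) hx hx')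
      (hG.2.1 _ _ h2).2
  unfold pvStepA
  rw [if_pos (by exact hedge)]
  simp only [pv_findGrupos_eq g hG q1 q2, hk1, hk2, hg1, hg2, hupd]
  rw [if_pos (by simpa using hr)]
  exact pv_merge_cleanup g hG h1 h2 hr

-- ---- abstract behaviour of A's step ----
theorem pv_stepA_main (ne : List (Int × Int)) (g : PySem.Dict Int (List Int))
    (q1 q2 : Int) (hG : pvGInv g) :
    pvGInv (pvStepA ne g q1 q2) ∧
    (∀ s, pvInG (pvStepA ne g q1 q2) s ↔ pvInG g s) ∧
    (∀ a b, pvSameG g a b → pvSameG (pvStepA ne g q1 q2) a b) := by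
  by_cases hedge : pvEdge ne q1 q2
  · cases hk1 : pvGroupKey? g q1 with
    | none =>
      rw [pv_stepA_of_none ne g hG (Or.inl hk1)]
      exact ⟨hG, fun s => Iff.rfl, fun a b h => h⟩
    | some r1 =>
      cases hk2 : pvGroupKey? g q2 with
      | none =>
        rw [pv_stepA_of_none ne g hG (Or.inr hk2)]
        exact ⟨hG, fun s => Iff.rfl, fun a b h => h⟩
      | some r2 =>
        by_cases hr : r1 = r2
        · rw [pv_stepA_of_same ne g hG (by rw [hk1, hk2, hr])]
          exact ⟨hG, fun s => Iff.rfl, fun a b h => h⟩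
        · obtain ⟨v1, h1, hq1⟩ := pv_groupKey?_some_inv g hG hk1
          obtain ⟨v2, h2, hq2⟩ := pv_groupKey?_some_inv g hG hk2
          rw [pv_stepA_of_merge ne g hG hedge hk1 hk2 hr h1 h2]
          exact ⟨pv_merge_GInv g hG h1 h2 hr, pv_merge_inG g hG h1 h2 hr,
            fun a b h => pv_merge_sameG g hG h1 h2 hr h⟩
  · rw [pv_stepA_of_nedge ne g hedge]
    exact ⟨hG, fun s => Iff.rfl, fun a b h => h⟩

theorem pv_stepA_makes_done (ne : List (Int × Int)) (g : PySem.Dict Int (List Int))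
    (q1 q2 : Int) (hG : pvGInv g) (hin1 : pvInG g q1) (hin2 : pvInG g q2) :
    pvDone ne (pvStepA ne g q1 q2) q1 q2 := by
  by_cases hedge : pvEdge ne q1 q2
  · obtain ⟨k1, v1, hk1, hq1⟩ := hin1
    obtain ⟨k2, v2, hk2, hq2⟩ := hin2
    have hg1 : pvGroupKey? g q1 = some k1 := pv_groupKey?_some g hG hk1 hq1
    have hg2 : pvGroupKey? g q2 = some k2 := pv_groupKey?_some g hG hk2 hq2
    by_cases hr : k1 = k2
    · subst hr
      obtain rfl : v1 = v2 := by rw [hk1] at hk2; exact Option.some.inj hk2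
      rw [pv_stepA_of_same ne g hG (by rw [hg1, hg2])]
      exact Or.inr ⟨k1, v1, hk1, hq1, hq2⟩
    · rw [pv_stepA_of_merge ne g hG hedge hg1 hg2 hr hk1 hk2]
      exact Or.inr ⟨k1, v1 ++ v2,
        by rw [pv_merge_get? g k1 k2 _ hr, if_neg hr, if_pos rfl],
        by simp [hq1], by simp [hq2]⟩
  · exact Or.inl hedge

theorem pv_stepA_noop_of_done (ne : List (Int × Int)) (g : PySem.Dict Int (List Int))
    (q1 q2 : Int) (hG : pvGInv g) (hdone : pvDone ne g q1 q2) :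
    pvStepA ne g q1 q2 = g := by
  rcases hdone with h | ⟨k, v, hk, h1, h2⟩
  · exact pv_stepA_of_nedge ne g h
  · exact pv_stepA_of_same ne g hG
      (by rw [pv_groupKey?_some g hG hk h1, pv_groupKey?_some g hG hk h2])

-- ---- symmetry of "done" ----
theorem pv_done_symm (ne : List (Int × Int)) (g : PySem.Dict Int (List Int)) {a b : Int}
    (h : pvDone ne g a b) : pvDone ne g b a := by
  rcases h with h | ⟨k, v, hk, h1, h2⟩
  · left
    rintro ⟨hne, hmin⟩
    exact h ⟨Ne.symm hne, by rwa [min_comm, max_comm]⟩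
  · exact Or.inr ⟨k, v, hk, h2, h1⟩

theorem pv_done_refl (ne : List (Int × Int)) (g : PySem.Dict Int (List Int)) (a : Int) :
    pvDone ne g a a := Or.inl (fun h => h.1 rfl)

-- ---- A's inner loop over a list of partners ----
theorem pv_foldA_inv (ne : List (Int × Int)) (q1 : Int) (l : List Int)
    (g : PySem.Dict Int (List Int)) (hG : pvGInv g) :
    pvGInv (l.foldl (fun g q2 => pvStepA ne g q1 q2) g) ∧
    (∀ s, pvInG (l.foldl (fun g q2 => pvStepA ne g q1 q2) g) s ↔ pvInG g s) ∧
    (∀ a b, pvDone ne g a b → pvDone ne (l.foldl (fun g q2 => pvStepA ne g q1 q2) g) a b) := by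
  induction l generalizing g with
  | nil => exact ⟨hG, fun s => Iff.rfl, fun a b h => h⟩
  | cons q2 t ih =>
    obtain ⟨hG', hin', hsame'⟩ := pv_stepA_main ne g q1 q2 hG
    obtain ⟨ihG, ihin, ihdone⟩ := ih (pvStepA ne g q1 q2) hG'
    refine ⟨ihG, fun s => (ihin s).trans (hin' s), fun a b h => ihdone a b ?_⟩
    rcases h with h | h
    · exact Or.inl h
    · exact Or.inr (hsame' a b h)

theorem pv_foldA_makes (ne : List (Int × Int)) (q1 : Int) (l : List Int)
    (g : PySem.Dict Int (List Int)) (hG : pvGInv g) (hq1 : pvInG g q1)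
    (hl : ∀ b ∈ l, pvInG g b) :
    ∀ b ∈ l, pvDone ne (l.foldl (fun g q2 => pvStepA ne g q1 q2) g) q1 b := by
  induction l generalizing g with
  | nil => intro b hb; exact absurd hb (by simp)
  | cons q2 t ih =>
    obtain ⟨hG', hin', hsame'⟩ := pv_stepA_main ne g q1 q2 hG
    have hstepdone : pvDone ne (pvStepA ne g q1 q2) q1 q2 :=
      pv_stepA_makes_done ne g q1 q2 hG hq1 (hl q2 (by simp))
    intro b hb
    rcases List.mem_cons.mp hb with rfl | hb
    · exact (pv_foldA_inv ne q1 t _ hG').2.2 q1 b hstepdone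
    · exact ih (pvStepA ne g q1 q2) hG' ((hin' q1).mpr hq1)
        (fun x hx => (hin' x).mpr (hl x (by simp [hx]))) b hb

theorem pv_foldA_noop (ne : List (Int × Int)) (q1 : Int) (l : List Int)
    (g : PySem.Dict Int (List Int)) (hG : pvGInv g)
    (h : ∀ b ∈ l, pvDone ne g q1 b) :
    l.foldl (fun g q2 => pvStepA ne g q1 q2) g = g :=
  pv_foldl_id _ _ _ (fun b hb => pv_stepA_noop_of_done ne g q1 b hG (h b hb))

-- ---- A's full double loop equals the triangular loop ----
theorem pv_outerA (ne : List (Int × Int)) (alc : List Int) :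
    ∀ (t pre : List Int) (g : PySem.Dict Int (List Int)), alc = pre ++ t → pvGInv g →
    (∀ q ∈ alc, pvInG g q) → (∀ a ∈ pre, ∀ b ∈ alc, pvDone ne g a b) →
    t.foldl (fun g q1 => alc.foldl (fun g q2 => pvStepA ne g q1 q2) g) g = pvTriA ne g t := by
  intro t
  induction t with
  | nil => intro pre g _ _ _ _; rfl
  | cons q1 t ih =>
    intro pre g halc hG hcov hpre
    have hq1alc : q1 ∈ alc := by simp [halc]
    -- the inner loop over alc: prefix part and the (q1, q1) step are no-ops
    have hinner : alc.foldl (fun g q2 => pvStepA ne g q1 q2) g =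
        t.foldl (fun g q2 => pvStepA ne g q1 q2) g := by
      rw [halc, List.foldl_append, pv_foldA_noop ne q1 pre g hG
        (fun b hb => pv_done_symm ne g (hpre b hb q1 hq1alc))]
      simp only [List.foldl_cons]
      rw [pv_stepA_noop_of_done ne g q1 q1 hG (pv_done_refl ne g q1)]
    simp only [List.foldl_cons, hinner, pvTriA]
    obtain ⟨hG', hin', hdone'⟩ := pv_foldA_inv ne q1 t g hG
    apply ih (pre ++ [q1]) _ (by simp [halc]) hG'
      (fun q hq => (hin' q).mpr (hcov q hq))
    intro a ha b hb
    rcases List.mem_append.mp ha with ha | ha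
    · exact hdone' a b (hpre a ha b hb)
    · have haq : a = q1 := by simpa using ha
      rcases (List.mem_append.mp (halc ▸ hb)) with hbpre | hbq1t
      · exact hdone' a b (pv_done_symm ne g (hpre b hbpre a (haq ▸ hq1alc)))
      · rcases List.mem_cons.mp hbq1t with hbq | hbt
        · rw [haq, hbq]
          exact hdone' q1 q1 (pv_done_refl ne g q1)
        · rw [haq]
          exact pv_foldA_makes ne q1 t g hG (hcov q1 hq1alc)
            (fun x hx => hcov x (by simp [halc, hx])) b hbt

-- ---- lockstep: B's step tracks A's step ----
theorem pv_get?_foldl_insert_const (c : Int) (l : List Int) (d : PySem.Dict Int Int)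
    (s : Int) :
    (l.foldl (fun r s => r.insert s c) d).get? s = if s ∈ l then some c else d.get? s := by
  induction l generalizing d with
  | nil => simp
  | cons a t ih =>
    simp only [List.foldl_cons, ih, PySem.Dict.get?_insert, List.mem_cons]
    by_cases hst : s ∈ t <;> by_cases hsa : s = a <;> simp [hst, hsa]

theorem pv_stepB_eq (ne : List (Int × Int)) (neS : PySem.Set (Int × Int))
    (hneS : ∀ x : Int × Int, neS.contains x = true ↔ x ∈ ne)
    (g : PySem.Dict Int (List Int)) (r : PySem.Dict Int Int) (q1 q2 : Int)
    (hG : pvGInv g) (hR : pvRepInv r g) :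
    (pvStepB neS (r, g) q1 q2).2 = pvStepA ne g q1 q2 ∧
    pvGInv (pvStepA ne g q1 q2) ∧
    pvRepInv (pvStepB neS (r, g) q1 q2).1 (pvStepA ne g q1 q2) := by
  by_cases hedge : pvEdge ne q1 q2
  · have hcond : q1 ≠ q2 ∧ ¬ (neS.contains (min q1 q2, max q1 q2) = true) :=
      ⟨hedge.1, fun hc => hedge.2 ((hneS _).mp hc)⟩
    cases hk1 : pvGroupKey? g q1 with
    | none =>
      rw [pv_stepA_of_none ne g hG (Or.inl hk1)]
      unfold pvStepB
      rw [if_pos hcond]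
      have : (r, g).1.get? q1 = none := by rw [hR q1, hk1]
      rw [this]
      cases (r, g).1.get? q2 <;> exact ⟨rfl, hG, hR⟩
    | some r1 =>
      cases hk2 : pvGroupKey? g q2 with
      | none =>
        rw [pv_stepA_of_none ne g hG (Or.inr hk2)]
        unfold pvStepB
        rw [if_pos hcond]
        have h1 : (r, g).1.get? q1 = some r1 := by rw [hR q1, hk1]
        have h2 : (r, g).1.get? q2 = none := by rw [hR q2, hk2]
        rw [h1, h2]
        exact ⟨rfl, hG, hR⟩
      | some r2 =>
        have hg1 : (r, g).1.get? q1 = some r1 := by rw [hR q1, hk1]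
        have hg2 : (r, g).1.get? q2 = some r2 := by rw [hR q2, hk2]
        by_cases hr : r1 = r2
        · rw [pv_stepA_of_same ne g hG (by rw [hk1, hk2, hr])]
          unfold pvStepB
          rw [if_pos hcond, hg1, hg2]
          dsimp only
          rw [if_neg (by simp [hr])]
          exact ⟨rfl, hG, hR⟩
        · obtain ⟨v1, h1, hq1⟩ := pv_groupKey?_some_inv g hG hk1
          obtain ⟨v2, h2, hq2⟩ := pv_groupKey?_some_inv g hG hk2
          have hd1 : (r, g).2.getD r1 [] = v1 := PySem.Dict.getD_of_get?_eq_some g [] h1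
          have hd2 : (r, g).2.getD r2 [] = v2 := PySem.Dict.getD_of_get?_eq_some g [] h2
          rw [pv_stepA_of_merge ne g hG hedge hk1 hk2 hr h1 h2]
          unfold pvStepB
          rw [if_pos hcond, hg1, hg2]
          dsimp only
          rw [if_pos hr, hd1, hd2]
          refine ⟨rfl, pv_merge_GInv g hG h1 h2 hr, ?_⟩
          intro s
      /- representative map after the merge -/
          show (v2.foldl (fun r s => r.insert s r1) r).get? s = _
          rw [pv_get?_foldl_insert_const r1 v2 r s,
            pv_merge_groupKey? g hG h1 h2 hr s]
          by_cases hs2 : s ∈ v2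
          · rw [if_pos hs2, if_pos (Or.inr hs2)]
          · rw [if_neg hs2, hR s]
            by_cases hs1 : s ∈ v1
            · rw [if_pos (Or.inl hs1), pv_groupKey?_some g hG h1 hs1]
            · rw [if_neg (by tauto)]
  · have hcond : ¬ (q1 ≠ q2 ∧ ¬ (neS.contains (min q1 q2, max q1 q2) = true)) := by
      intro hc
      exact hedge ⟨hc.1, fun hm => hc.2 ((hneS _).mpr hm)⟩
    rw [pv_stepA_of_nedge ne g hedge]
    unfold pvStepB
    rw [if_neg hcond]
    exact ⟨rfl, hG, hR⟩

theorem pv_foldB_eq (ne : List (Int × Int)) (neS : PySem.Set (Int × Int))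
    (hneS : ∀ x : Int × Int, neS.contains x = true ↔ x ∈ ne) (q1 : Int) (l : List Int) :
    ∀ (g : PySem.Dict Int (List Int)) (r : PySem.Dict Int Int), pvGInv g → pvRepInv r g →
    (l.foldl (fun st q2 => pvStepB neS st q1 q2) (r, g)).2 =
      l.foldl (fun g q2 => pvStepA ne g q1 q2) g ∧
    pvGInv (l.foldl (fun g q2 => pvStepA ne g q1 q2) g) ∧
    pvRepInv (l.foldl (fun st q2 => pvStepB neS st q1 q2) (r, g)).1
      (l.foldl (fun g q2 => pvStepA ne g q1 q2) g) := by
  induction l with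
  | nil => intro g r hG hR; exact ⟨rfl, hG, hR⟩
  | cons q2 t ih =>
    intro g r hG hR
    obtain ⟨h2, hG', hR'⟩ := pv_stepB_eq ne neS hneS g r q1 q2 hG hR
    have hsplit : pvStepB neS (r, g) q1 q2 =
        ((pvStepB neS (r, g) q1 q2).1, pvStepA ne g q1 q2) := by
      rw [← h2]
    rw [List.foldl_cons, List.foldl_cons, hsplit]
    exact ih (pvStepA ne g q1 q2) (pvStepB neS (r, g) q1 q2).1 hG' hR'

theorem pv_loopB_eq (ne : List (Int × Int)) (neS : PySem.Set (Int × Int))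
    (hneS : ∀ x : Int × Int, neS.contains x = true ↔ x ∈ ne) :
    ∀ (l : List Int) (g : PySem.Dict Int (List Int)) (r : PySem.Dict Int Int),
    pvGInv g → pvRepInv r g → (pvLoopB neS (r, g) l).2 = pvTriA ne g l := by
  intro l
  induction l with
  | nil => intro g r _ _; rfl
  | cons q1 t ih =>
    intro g r hG hR
    obtain ⟨h2, hG', hR'⟩ := pv_foldB_eq ne neS hneS q1 t g r hG hR
    have hsplit : t.foldl (fun st q2 => pvStepB neS st q1 q2) (r, g) =
        ((t.foldl (fun st q2 => pvStepB neS st q1 q2) (r, g)).1,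
         t.foldl (fun g q2 => pvStepA ne g q1 q2) g) := by
      rw [← h2]
    show (pvLoopB neS (t.foldl (fun st q2 => pvStepB neS st q1 q2) (r, g)) t).2 = _
    rw [hsplit]
    exact ih _ _ hG' hR'

-- ---- the initial state ----
theorem pv_g0_get? (alc : List Int) (d : PySem.Dict Int (List Int)) (s : Int) :
    (alc.foldl (fun d e => d.insert e (PySem.Set.ofList [e])) d).get? s =
      if s ∈ alc then some [s] else d.get? s :=
  pv_get?_foldl_insert (fun e => PySem.Set.ofList [e]) alc d s

theorem pv_r0_get? (alc : List Int) (d : PySem.Dict Int Int) (s : Int) :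
    (alc.foldl (fun d e => d.insert e e) d).get? s =
      if s ∈ alc then some s else d.get? s :=
  pv_get?_foldl_insert (fun e => e) alc d s

theorem pv_g0_GInv (alc : List Int) :
    pvGInv (alc.foldl (fun d e => d.insert e (PySem.Set.ofList [e])) PySem.Dict.empty) := by
  have hnd : (alc.foldl (fun d e => d.insert e (PySem.Set.ofList [e]))
      PySem.Dict.empty).keys.Nodup :=
    PySem.Dict.nodup_keys_foldl_insert alc (fun _ e => PySem.Set.ofList [e]) _
      PySem.Dict.nodup_keys_empty
  have hget : ∀ s, (alc.foldl (fun d e => d.insert e (PySem.Set.ofList [e]))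
      PySem.Dict.empty).get? s = if s ∈ alc then some [s] else none := by
    intro s
    rw [pv_g0_get?, PySem.Dict.get?_empty]
  have hitems : ∀ p ∈ (alc.foldl (fun d e => d.insert e (PySem.Set.ofList [e]))
      PySem.Dict.empty).items, p.2 = [p.1] := by
    intro p hp
    have hg := PySem.Dict.get?_of_mem_items _ (show (p.1, p.2) ∈ _ by simpa using hp) hnd
    rw [hget p.1] at hg
    by_cases hpa : p.1 ∈ alc
    · rw [if_pos hpa] at hg
      exact (Option.some.inj hg).symm
    · rw [if_neg hpa] at hg
      exact ((Option.some_ne_none _) hg.symm).elim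
  refine ⟨hnd, ?_, ?_⟩
  · intro k v hk
    rw [hget k] at hk
    by_cases hka : k ∈ alc
    · rw [if_pos hka] at hk
      obtain rfl : [k] = v := Option.some.inj hk
      simp
    · rw [if_neg hka] at hk
      exact ((Option.some_ne_none _) hk.symm).elim
  · have hkeysne : (alc.foldl (fun d e => d.insert e (PySem.Set.ofList [e]))
        PySem.Dict.empty).items.Pairwise (fun p p' => p.1 ≠ p'.1) := by
      have := hnd
      rw [PySem.Dict.keys, List.Nodup, List.pairwise_map] at this
      exact this
    refine hkeysne.imp_of_mem ?_
    intro p p' hp hp' hne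
    rw [hitems p hp, hitems p' hp']
    intro x hx hx'
    simp only [List.mem_singleton] at hx hx'
    exact hne (hx ▸ hx' ▸ rfl)

theorem pv_g0_cover (alc : List Int) :
    ∀ q ∈ alc, pvInG (alc.foldl (fun d e => d.insert e (PySem.Set.ofList [e]))
      PySem.Dict.empty) q := by
  intro q hq
  exact ⟨q, [q], by rw [pv_g0_get?, PySem.Dict.get?_empty, if_pos hq], by simp⟩

theorem pv_r0_RepInv (alc : List Int) :
    pvRepInv (alc.foldl (fun d e => d.insert e e) PySem.Dict.empty)
      (alc.foldl (fun d e => d.insert e (PySem.Set.ofList [e])) PySem.Dict.empty) := by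
  intro s
  rw [pv_r0_get?, PySem.Dict.get?_empty]
  by_cases hs : s ∈ alc
  · rw [if_pos hs]
    exact (pv_groupKey?_some _ (pv_g0_GInv alc)
      (by rw [pv_g0_get?, PySem.Dict.get?_empty, if_pos hs]) (by simp)).symm
  · rw [if_neg hs]
    refine (pv_groupKey?_none _ (pv_g0_GInv alc) ?_).symm
    rintro ⟨k, v, hk, hsv⟩
    rw [pv_g0_get?, PySem.Dict.get?_empty] at hk
    by_cases hka : k ∈ alc
    · rw [if_pos hka] at hk
      obtain rfl : [k] = v := Option.some.inj hk
      simp only [List.mem_singleton] at hsv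
      exact hs (hsv ▸ hka)
    · rw [if_neg hka] at hk
      exact ((Option.some_ne_none _) hk.symm).elim

-- ===== VERDICT (by name: the statement is the Claim_ definition above) =====
theorem agrupar_estados_equivalentes_spec : Claim_equal_agrupar_estados_equivalentes := by
  intro alc ne _hdom
  unfold Spec_agrupar_estados_equivalentes agrupar_estados_equivalentes
    agrupar_estados_equivalentes_alt
  dsimp only
  have hG0 := pv_g0_GInv alc
  have hR0 := pv_r0_RepInv alc
  have hneS : ∀ x : Int × Int, (PySem.Set.ofList ne).contains x = true ↔ x ∈ ne := by
    intro x
    rw [PySem.Set.contains, List.contains_iff_mem, PySem.Set.mem_ofList]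
  have hfull := pv_outerA ne alc alc []
    (alc.foldl (fun d e => d.insert e (PySem.Set.ofList [e])) PySem.Dict.empty)
    (by simp) hG0 (pv_g0_cover alc) (by simp)
  have hst0 : alc.foldl (fun st e => (st.1.insert e e, st.2.insert e [e]))
      ((PySem.Dict.empty : PySem.Dict Int Int),
       (PySem.Dict.empty : PySem.Dict Int (List Int))) =
      (alc.foldl (fun d e => d.insert e e) PySem.Dict.empty,
       alc.foldl (fun d e => d.insert e (PySem.Set.ofList [e])) PySem.Dict.empty) :=
    pv_foldl_pair alc (fun d e => d.insert e e)
      (fun d e => d.insert e (PySem.Set.ofList [e])) PySem.Dict.empty PySem.Dict.empty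
  have htri := pv_loopB_eq ne (PySem.Set.ofList ne) hneS alc
    (alc.foldl (fun d e => d.insert e (PySem.Set.ofList [e])) PySem.Dict.empty)
    (alc.foldl (fun d e => d.insert e e) PySem.Dict.empty) hG0 hR0
  rw [hfull, hst0, htri]
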